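-- pv_equiv track=rewrite | github.com/pypi-data/pypi-mirror-81 | packages/bitmask-decoder/bitmask-decoder-0.0.4.tar.gz/bitmask-decoder-0.0.4/bitmask_decoder/bitmask_decoder.py | get_dow
-- ===== SOURCE A (Python) =====
-- from itertools import combinations
--
-- days_to_string = {
--     1: "Mon",
--     2: "Tue",
--     4: "Wed",
--     8: "Thu",
--     16: "Fri",
--     32: "Sat",
--     64: "Sun"
-- }
--
-- def find_dow(dow):
--     lis = [1, 2, 4, 8, 16, 32, 64]
--     for n in range(1, len(lis)+1):
--         for comb in combinations(lis, n):
--             try: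
--                 if sum(comb) == int(dow):
--                     return comb
--             except:
--                 return None
--
-- def get_dow(column):
--     all_days = []
--     d_list = [find_dow(val) for val in column]
--     for item in d_list:
--         d = ''
--         try:
--             for i in item:
--                 if i == item[-1]:
--                     d += (days_to_string[i])
--                 else:
--                     d += (days_to_string[i] + ', ')
--
--             all_days.append(d)
--
--         except:
--             d += 'NaN'
--             all_days.append(d)
--
--     return all_days
-- ===== SOURCE B (Python) =====
-- DAY_NAMES = ["Mon", "Tue", "Wed", "Thu", "Fri", "Sat", "Sun"]
--
-- def _decode(v):
--     if not 1 <= v <= 127: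
--         return "NaN"
--     return ", ".join(DAY_NAMES[b] for b in range(7) if (v >> b) & 1)
--
-- def get_dow(column):
--     return [_decode(v) for v in column]
-- ===== Notes on version B (the rewrite author's own statement) =====
-- stated objective: simpler
-- what changed: Replaced the exponential subset-sum search over itertools.combinations of the seven power-of-two day codes with direct bit decomposition of the integer (test each of 7 bits and join the matching day names), which yields the same ascending comma-joined string and 'NaN' for values outside 1..127.
import Mathlib
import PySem

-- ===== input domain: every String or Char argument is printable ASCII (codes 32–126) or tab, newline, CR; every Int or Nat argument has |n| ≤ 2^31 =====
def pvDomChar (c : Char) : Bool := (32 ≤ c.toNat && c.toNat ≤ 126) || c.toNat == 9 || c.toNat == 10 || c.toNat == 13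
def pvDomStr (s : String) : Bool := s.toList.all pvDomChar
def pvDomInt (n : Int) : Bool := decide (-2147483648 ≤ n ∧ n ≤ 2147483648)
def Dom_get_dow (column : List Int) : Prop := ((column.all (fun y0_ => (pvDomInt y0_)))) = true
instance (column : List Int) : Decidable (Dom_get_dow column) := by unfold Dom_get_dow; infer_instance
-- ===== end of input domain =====

-- B replaces A's exhaustive itertools.combinations subset-sum search with direct 7-bit
-- decomposition of the integer; same strings, simpler and with a smaller constant factor.

-- ===== PORT A =====
-- days_to_string
def daysToString : PySem.Dict Int String :=
  PySem.Dict.ofList [(1, "Mon"), (2, "Tue"), (4, "Wed"), (8, "Thu"), (16, "Fri"), (32, "Sat"), (64, "Sun")]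

def lisA : List Int := [1, 2, 4, 8, 16, 32, 64]

-- itertools.combinations(xs, n) in Python's lexicographic order
def combosA : Nat → List Int → List (List Int)
  | 0, _ => [[]]
  | _ + 1, [] => []
  | n + 1, x :: xs => (combosA n xs).map (x :: ·) ++ combosA (n + 1) xs

-- 'for n in range(1, len(lis)+1): for comb in combinations(lis, n): if sum(comb) == int(dow): return comb'
-- (dow is already an int here, so int(dow) never raises)
def findDowLoop (dow : Int) : List Nat → Option (List Int)
  | [] => none
  | n :: ns =>
    match (combosA n lisA).find? (fun c => c.sum == dow) with
    | some c => some c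
    | none => findDowLoop dow ns

def find_dow (dow : Int) : Option (List Int) := findDowLoop dow [1, 2, 3, 4, 5, 6, 7]

-- inner 'for i in item' loop of get_dow; failure of item[-1] or the dict lookup is the
-- except path (appends 'NaN' to the string built so far and stops)
def joinLoopA (item : List Int) (d : String) : List Int → String
  | [] => d
  | i :: rest =>
    match PySem.List.pyGet? item (-1), PySem.Dict.get? daysToString i with
    | some last, some s =>
      if i == last then joinLoopA item (d ++ s) rest
      else joinLoopA item (d ++ s ++ ", ") rest
    | _, _ => d ++ "NaN"

-- body of the 'for item in d_list' loop; iterating None raises → except path with d = ''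
def decodeItemA : Option (List Int) → String
  | none => "" ++ "NaN"
  | some item => joinLoopA item "" item

def get_dow (column : List Int) : List String :=
  (column.map (fun val => find_dow val)).map decodeItemA

-- ===== PORT B =====
def dayNamesB : List String := ["Mon", "Tue", "Wed", "Thu", "Fri", "Sat", "Sun"]

def decodeB (v : Int) : String :=
  if 1 ≤ v ∧ v ≤ 127 then
    PySem.Str.join ", "
      (((List.range 7).filter (fun b : Nat => PySem.Int.band (v >>> b) 1 == 1)).map
        (fun b => dayNamesB.getD b ""))
  else "NaN"

def get_dow_alt (column : List Int) : List String := column.map decodeB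

-- ===== PRECONDITION & SPEC =====
def Spec_get_dow (column : List Int) (out : List String) : Prop := out = get_dow_alt column
instance (column : List Int) (out : List String) : Decidable (Spec_get_dow column out) := by unfold Spec_get_dow; infer_instance

-- ===== CLAIM (what is proved, stated in full; the proofs are below) =====
def Claim_equal_get_dow : Prop := ∀ (column : List Int), Dom_get_dow column → Spec_get_dow column (get_dow column)

-- ===== LEMMAS AND PROOFS =====

-- every combination combinations(lis, n) yields for n in 1..7 has sum between 1 and 127
lemma combosA_sum_bounds :
    ∀ n ∈ [1, 2, 3, 4, 5, 6, 7], ∀ c ∈ combosA n lisA, 1 ≤ c.sum ∧ c.sum ≤ 127 := by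
  decide

lemma findDowLoop_none_of_out (dow : Int) (h : dow < 1 ∨ 127 < dow) :
    findDowLoop dow [1, 2, 3, 4, 5, 6, 7] = none := by
  have key : ∀ n ∈ [1, 2, 3, 4, 5, 6, 7],
      (combosA n lisA).find? (fun c => c.sum == dow) = none := by
    intro n hn
    apply List.find?_eq_none.mpr
    intro c hc
    have := combosA_sum_bounds n hn c hc
    simp only [beq_iff_eq]
    omega
  simp [findDowLoop, key 1 (by decide), key 2 (by decide), key 3 (by decide),
    key 4 (by decide), key 5 (by decide), key 6 (by decide), key 7 (by decide)]

lemma decode_agree (v : Int) : decodeItemA (find_dow v) = decodeB v := by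
  by_cases h : 1 ≤ v ∧ v ≤ 127
  · obtain ⟨h1, h2⟩ := h
    interval_cases v <;> decide
  · have hout : v < 1 ∨ 127 < v := by omega
    have : find_dow v = none := findDowLoop_none_of_out v hout
    rw [this]
    simp [decodeItemA, decodeB, h]

-- ===== VERDICT (by name: the statement is the Claim_ definition above) =====
theorem get_dow_spec : Claim_equal_get_dow := by
  intro column _
  unfold Spec_get_dow get_dow get_dow_alt
  rw [List.map_map]
  exact List.map_congr_left (fun v _ => decode_agree v)
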